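/- GENERATED by mk_final_copies.py from the proof of the farm's unit `decode_residue.7c` (farm:decode_residue.7c.1: Proof.lean) as the
   re-elaboration sweep compiled it — do not edit. -/
import Vorbis.Spec.Units.decode_residue_7c
import Vorbis.Spec.Worked.decode_residue_7c_Lemmas

open X86 X86.User Asan Vorbis Vorbis.Spec Vorbis.Spec.DecodeResidue

set_option maxRecDepth 4000
set_option maxHeartbeats 4000000

/-!
  decode_residue.7c (0x10f40d – 0x10f4a3; C 2219–2221), walked in three phases between two cut points of its own (`joinD7c`,
  `cutE7c` of Lemmas.lean); at every cut COMMON and the loop part `DecodeA` are re-established for the present memory: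

      start7c   At17 (at `v`) + At17Mid2 (at `s`) ⇒ AtC7c at `s`      (no code)
      phaseC7c  0x10f40d → joinD7c 0x10f447   `if (c->sparse) q = c->sorted_values[q]` (also for −1: K4's sentinel)
      phaseD7c  joinD7c  → cut38 (EOP) or cutE7c 0x10f49f, then phaseE7c: the store, to cut23 with FILL(0, class_set + 1)
-/

namespace Vorbis.Spec.decode_residue_7c

/-- Phase C (0x10f40d … 0x10f447; C 2219): `if (c->sparse) q = c->sorted_values[q]`, executed also for `q = −1`: the load is
then the word before the pointer (K4's block and sentinel: `sv_site7c`). -/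
theorem phaseC7c (Lay : Layout) (hLay : Lay.hi = 0x1000000) (μ : Microarch) (hμ : UserX.MicroOK μ) (u₀ : State)
    (hcode : HasCodeNat Lay u₀ Vorbis.L.decode_residue.entry Vorbis.Code.code_decode_residue.nat Vorbis.L.decode_residue.size)
    (hld8 : Asan.SmallCheck Lay μ Vorbis.WayInv (Vorbis.CodeOK u₀) [.rax, .rcx, .rdx] 8 Vorbis.L.__asan_load8_noabort.entry)
    (hld1 : Asan.SmallCheck Lay μ Vorbis.WayInv (Vorbis.CodeOK u₀) [.rax, .rdx] 1 Vorbis.L.__asan_load1_noabort.entry)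
    (hld4 : Asan.SmallCheck Lay μ Vorbis.WayInv (Vorbis.CodeOK u₀) [.rax, .rcx, .rdx] 4 Vorbis.L.__asan_load4_noabort.entry)
    (g : G) (hent : Entered u₀ g) (cs pcount : Nat) (v : State) (hat : AtC7c u₀ g cs pcount v) :
    ReachVia Lay μ WayInv v (AtD7c u₀ g cs pcount) := by
  obtain ⟨hrip, hc, hch3, hr12, hloop, hr14, hrdi0, q, hq, hslot⟩ := hat
  have he := hent.entry
  v_entry he
  have hwf := where_f7c hent
  obtain ⟨ecb, hcb, hapart, hbook, hcl⟩ := book_facts7c hent hc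
  obtain ⟨f, hf⟩ : ∃ f : Nat, (g.e.reg .rdi).toNat = f := ⟨_, rfl⟩
  have hgf : g.f = f := hf
  have hrdi : g.e.reg .rdi = addr f := eq_addr _ _ hf
  obtain ⟨cb, hcbk⟩ : ∃ cb : Nat, cbk7c g = cb := ⟨_, rfl⟩
  rw [hgf] at hwf
  obtain ⟨hwf1, hwf2, hwf3⟩ := hwf
  have haf : (addr f).toNat = f := toNat_addr f (by omega)
  have hbits : Bits g.Blk g.len v.mem g.f := (show Real.VorbisOK g.len g.Blk v.mem g.f from hc.point.vorbis).bits
  have hwc := where_cb7c hent hc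
  rw [hcbk, hgf] at hwc
  obtain ⟨hwc1, hwc2, hwc3, hwc4⟩ := hwc
  have hacb : (addr cb).toNat = cb := toNat_addr cb (by omega)
  have w_rip := hrip
  have hv_rsp := hc.rsp
  have hv_rbp := hc.rbp
  have hv_r12 := hr12
  have hv_r15 := hloop.r15
  have hv_r14 : v.reg .r14 = addr cb := by rw [hr14, hcbk]; rfl
  have hv_rdi : v.reg .rdi = addr cb + 27 := by rw [hrdi0, hcbk]; rfl
  clear hr12 hr14 hrdi0
  have w_eq : Mem.EqOn Vorbis.L.textLo Vorbis.L.textHi u₀.mem v.mem := hc.code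
  have hdf : v.flags .df = false := (show abiInv _ from hc.inv).1
  have hmx : v.mxcsr &&& 0x1F80 = 0x1F80 := (show abiInv _ from hc.inv).2
  have hsse := Vorbis.sseOK_of_abiInv hc.inv
  obtain ⟨sp, ld_sp⟩ : ∃ sp : Nat, v.mem.readLE (addr cb + 27) 1 = sp := ⟨_, rfl⟩
  have esp : Codebook.sparse v.mem cb = sp := by
    rw [← ld_sp]
    simp only [vfield, vacc, voff]
  obtain ⟨sv, ld_sv⟩ : ∃ sv : Nat, v.mem.readLE (addr cb + 2104) 8 = sv := ⟨_, rfl⟩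
  have esv : Codebook.sorted_values v.mem cb = sv := by
    rw [← ld_sv]
    simp only [vfield, vacc, voff]
  have fr_f : UInt64.ofNat (v.mem.readLE (g.e.reg .rsp - 184) 8) = addr f := by rw [hc.fr_f, hrdi]
  obtain ⟨qn, hqn⟩ : ∃ qn : Nat, (q % 2 ^ 32).toNat = qn := ⟨_, rfl⟩
  have sl_q : v.mem.readLE (g.e.reg .rsp - 192) 4 = qn := by rw [hslot, hqn]
  clear hslot
  have hsp_lt : sp < 256 := by
    rw [← ld_sp]
    exact Mem.readLE_lt' _ _ _
  by_cases hsp : sp = 0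
  · -- a dense book: no translation
    u_walk hcode [hμ.vendor] until [joinD7c] span [Vorbis.L.textLo, Vorbis.L.textHi] side (v_side)
    case check_10f40d =>
      -- 0x10f40d, load1 [c + 0x1b] (`c->sparse`)
      have hun : ShadowUntouched v.mem s_10f40d.mem := by v_untouched
      exact Vorbis.Spec.check_site hc.shadow hun (site_cbf7c hent hc 27 1 (by omega) (by omega))
        (by rw [hcbk]; simp only [vfield]; exact toNat_addr _ (by omega))
    case cont =>
      refine ReachVia.done ?_
      have hs : Mem.SameExcept (wins7c g) v.mem s_10f417.mem := by
        unfold wins7c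
        rw [hf]
        u_same
      have hs1 : Mem.SameExcept [⟨(g.e.reg .rsp).toNat - 256, (g.e.reg .rsp).toNat - 248⟩] v.mem s_10f417.mem := by
        u_same
      obtain ⟨hb1, hmu1⟩ := Vorbis.Spec.Reader.reader_of_window hbits hs1 (by omega)
      have hun : ShadowUntouched v.mem s_10f417.mem := by v_untouched
      have hcs : Common u₀ g s_10f417 := by
        apply carry_common7c hent hc (by rw [w_kept .rbp rfl]; exact hv_rbp) w_rsp w_eq (by v_inv) ?_ hs hun hb1 (by omega)
        rw [hrdi]
        u_resolve
      refine ⟨w_rip, hcs, hch3, ?_, ?_, q, ?_, ?_⟩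
      · rw [w_kept .r12 rfl]
        exact hv_r12
      · exact carry_decodeA7c hent hc hcs hch3 hs hloop (by rw [w_kept .r15 rfl]; exact hv_r15)
      · apply result_kept7c hent hc hs
        exact hcb.decode_dense (by rw [hcbk, esp]; exact hsp) hq
      · rw [hqn]
        u_resolve
  · -- a sparse book: `q = c->sorted_values[q]`, also for `q = -1` (K4's sentinel)
    obtain ⟨hsite, hsv4, hwa1, hwa2, hwa3, hq1, hq2, hres⟩ :=
      sv_site7c hent hc (by rw [hcbk, esp]; exact hsp) hq
    rw [hcbk, esv] at hsite hsv4 hwa1 hwa2 hwa3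
    have hea := sv_addr7c sv qn q hqn hq1 hq2 hsv4
    obtain ⟨a, ha⟩ : ∃ a : Nat, sv - 4 + 4 * (q + 1).toNat = a := ⟨_, rfl⟩
    rw [ha] at hsite hwa1 hwa2 hwa3 hea
    have haa : (addr a).toNat = a := toNat_addr a (by omega)
    obtain ⟨x, ld_x⟩ : ∃ x : Nat, v.mem.readLE
        (Word.ofBV (BitVec.signExtend 64 (BitVec.ofNat 32 qn)) <<< 2 + UInt64.ofNat sv) 4 = x := ⟨_, rfl⟩
    u_walk hcode [hμ.vendor] until [joinD7c] span [Vorbis.L.textLo, Vorbis.L.textHi] side (v_side)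
    case check_10f40d =>
      -- 0x10f40d, load1 [c + 0x1b] (`c->sparse`)
      have hun : ShadowUntouched v.mem s_10f40d.mem := by v_untouched
      exact Vorbis.Spec.check_site hc.shadow hun (site_cbf7c hent hc 27 1 (by omega) (by omega))
        (by rw [hcbk]; simp only [vfield]; exact toNat_addr _ (by omega))
    case check_10f420 =>
      -- 0x10f420, load8 [c + 0x838] (`c->sorted_values`)
      have hun : ShadowUntouched v.mem s_10f420.mem := by v_untouched
      exact Vorbis.Spec.check_site hc.shadow hun (site_cbf7c hent hc 2104 8 (by omega) (by omega))
        (by rw [hcbk]; simp only [vfield]; exact toNat_addr _ (by omega))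
    case check_10f43a =>
      -- 0x10f43a, load4 `c->sorted_values[q]`, `q ≥ -1` (K4: the word before the pointer is the sentinel)
      have hun : ShadowUntouched v.mem s_10f43a.mem := by v_untouched
      exact Vorbis.Spec.check_site hc.shadow hun hsite (by rw [hea]; exact haa)
    case cont =>
      refine ReachVia.done ?_
      have hs : Mem.SameExcept (wins7c g) v.mem s_10f441.mem := by
        unfold wins7c
        rw [hf]
        u_same
      have hs1 : Mem.SameExcept [⟨(g.e.reg .rsp).toNat - 256, (g.e.reg .rsp).toNat - 176⟩] v.mem s_10f441.mem := by
        u_same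
      obtain ⟨hb1, hmu1⟩ := Vorbis.Spec.Reader.reader_of_window hbits hs1 (by omega)
      have hun : ShadowUntouched v.mem s_10f441.mem := by v_untouched
      have hcs : Common u₀ g s_10f441 := by
        apply carry_common7c hent hc (by rw [w_kept .rbp rfl]; exact hv_rbp) w_rsp w_eq (by v_inv) ?_ hs hun hb1 (by omega)
        rw [hrdi]
        u_resolve
      have hx_lt : x < 2 ^ 32 := by
        rw [← ld_x]
        exact Mem.readLE_lt' _ _ _
      have ex : Codebook.sortedValue v.mem (cbk7c g) q = sint32 x := by
        unfold Codebook.sortedValue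
        rw [hcbk, esv, ha, ← ld_x, hea]
        rfl
      rw [ex] at hres
      refine ⟨w_rip, hcs, hch3, ?_, ?_, sint32 x, ?_, ?_⟩
      · rw [w_kept .r12 rfl]
        exact hv_r12
      · exact carry_decodeA7c hent hc hcs hch3 hs hloop (by rw [w_kept .r15 rfl]; exact hv_r15)
      · exact result_kept7c hent hc hs hres
      · rw [pattern_sint32_7c x hx_lt]
        have e32 : (BitVec.ofNat 32 x).toNat = x := by
          rw [BitVec.toNat_ofNat]
          exact Nat.mod_eq_of_lt hx_lt
        rw [e32] at w_mem
        u_resolve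
        exact Nat.mod_eq_of_lt hx_lt

/-- The last two instructions of the unit, from the cut `cutE7c` (`mov [r13], rbx ; jmp 10f692`): the store of pass 0 into the
slot `class_set` of row 0 of the temp block, to the exit assertion `At23` with FILL(0, class_set + 1). -/
theorem phaseE7c (Lay : Layout) (hLay : Lay.hi = 0x1000000) (μ : Microarch) (hμ : UserX.MicroOK μ) (u₀ : State)
    (hcode : HasCodeNat Lay u₀ Vorbis.L.decode_residue.entry Vorbis.Code.code_decode_residue.nat Vorbis.L.decode_residue.size)
    (g : G) (hent : Entered u₀ g) (cs pcount : Nat) (v : State) (hrip : v.rip = cutE7c) (hc : Common u₀ g v)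
    (hch3 : 3 ≤ g.ch) (hr12 : v.reg .r12 = UInt64.ofNat g.r) (hloop : DecodeA g cs pcount v) (row : Nat)
    (hrow : RowPtr v.mem g.f g.r row) (hrow_lt : row < 2 ^ 64)
    (hr13 : v.reg .r13 = addr (slot g.TB g.C g.PRD 0 cs)) (hrbx : v.reg .rbx = UInt64.ofNat row)
    (hacc : Lay.Has (addr (slot g.TB g.C g.PRD 0 cs)) 8) :
    ReachVia Lay μ WayInv v (fun v' => At23 u₀ g 0 cs pcount v' ∨ At38 u₀ g v') := by
  have he := hent.entry
  v_entry he
  have hwt := where_tb7c hent hc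
  have hC : 0 < g.C := by
    have := hent.args.ch_le
    have e : g.C = nchan g.e.mem g.f := rfl
    omega
  have hcs : cs < g.PRD := hloop.wa.slot_lt (hc.w_pos hent) hloop.lt
  have hsin := slot_inside g.TB hC hcs hc.tb.size
  obtain ⟨sl, hsl⟩ : ∃ sl : Nat, slot g.TB g.C g.PRD 0 cs = sl := ⟨_, rfl⟩
  rw [hsl] at hsin hr13 hacc
  obtain ⟨hwt1, hwt2, hwt3, hwt4, hwt5, hwt6⟩ := hwt
  have hasl : (addr sl).toNat = sl := toNat_addr sl (by omega)
  have hslw : 0x119d40 ≤ sl := by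
    have := hent.pre.arenaText
    have e : L.textHi = 0x119d40 := rfl
    omega
  have w_rip := hrip
  have hv_rsp := hc.rsp
  have hv_rbp := hc.rbp
  have hv_r12 := hr12
  have hv_r15 := hloop.r15
  have hv_r13 := hr13
  have hv_rbx := hrbx
  clear hr13 hrbx
  have w_eq : Mem.EqOn Vorbis.L.textLo Vorbis.L.textHi u₀.mem v.mem := hc.code
  have hdf : v.flags .df = false := (show abiInv _ from hc.inv).1
  have hmx : v.mxcsr &&& 0x1F80 = 0x1F80 := (show abiInv _ from hc.inv).2
  have hsse := Vorbis.sseOK_of_abiInv hc.inv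
  u_walk hcode [hμ.vendor] until [Vorbis.L.decode_residue.cut23] span [Vorbis.L.textLo, Vorbis.L.textHi] side (v_side)
  refine ReachVia.done (Or.inl ?_)
  have hmem : s_10f4a3.mem = v.mem.writeLE (addr (slot g.TB g.C g.PRD 0 cs)) 8 row := by
    have e : (UInt64.ofNat row).toNat = row := toNat_addr row hrow_lt
    rw [w_mem, hsl, e]
  have hun2 : ShadowUntouched v.mem s_10f4a3.mem := by
    rw [hmem, hsl]
    exact Mem.eqOn_writeLE _ (addr sl) 8 row 0xC00000 0x200000 (by omega) (by omega)
  obtain ⟨hc2, hs2⟩ := final_common7c hent hc hch3 hcs (by rw [w_kept .rbp rfl]; exact hv_rbp)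
    (by rw [w_kept .rsp rfl]; exact hv_rsp) w_eq (by v_inv) row hmem hun2
  have hin2 := final_inner7c hent hc hc2 hloop (by rw [w_kept .r15 rfl]; exact hv_r15) row hrow hrow_lt hmem hs2
  refine ⟨w_rip, hc2, hch3, ?_, hin2⟩
  rw [w_kept .r12 rfl]
  exact hv_r12

/-- Phase D (0x10f447 … 0x10f49f or the trampoline; C 2220–2221): `if (q == EOP) goto done` (exit `At38`); else the address
arithmetic of `part_classdata[0][class_set] = r->classdata[q]` with its four check sites, up to the cut `cutE7c` before the store;
the store itself is `phaseE7c`. -/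
theorem phaseD7c (Lay : Layout) (hLay : Lay.hi = 0x1000000) (μ : Microarch) (hμ : UserX.MicroOK μ) (u₀ : State)
    (hcode : HasCodeNat Lay u₀ Vorbis.L.decode_residue.entry Vorbis.Code.code_decode_residue.nat Vorbis.L.decode_residue.size)
    (hld8 : Asan.SmallCheck Lay μ Vorbis.WayInv (Vorbis.CodeOK u₀) [.rax, .rcx, .rdx] 8 Vorbis.L.__asan_load8_noabort.entry)
    (hst8 : Asan.SmallCheck Lay μ Vorbis.WayInv (Vorbis.CodeOK u₀) [.rax, .rcx, .rdx] 8 Vorbis.L.__asan_store8_noabort.entry)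
    (g : G) (hent : Entered u₀ g) (cs pcount : Nat) (v : State) (hat : AtD7c u₀ g cs pcount v) :
    ReachVia Lay μ WayInv v (fun v' => At23 u₀ g 0 cs pcount v' ∨ At38 u₀ g v') := by
  obtain ⟨hrip, hc, hch3, hr12, hloop, q, hq, hslot⟩ := hat
  have he := hent.entry
  v_entry he
  have hwf := where_f7c hent
  have hwr := where_r7c hent hc
  have hwt := where_tb7c hent hc
  obtain ⟨f, hf⟩ : ∃ f : Nat, (g.e.reg .rdi).toNat = f := ⟨_, rfl⟩
  have hgf : g.f = f := hf
  have hrdi : g.e.reg .rdi = addr f := eq_addr _ _ hf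
  obtain ⟨r, hr⟩ : ∃ r : Nat, g.r = r := ⟨_, rfl⟩
  obtain ⟨tb, htb⟩ : ∃ tb : Nat, g.TB.base = tb := ⟨_, rfl⟩
  rw [hgf] at hwf
  rw [hgf, hr] at hwr
  obtain ⟨hwf1, hwf2, hwf3⟩ := hwf
  obtain ⟨hwr1, hwr2, hwr3, -⟩ := hwr
  have haf : (addr f).toNat = f := toNat_addr f (by omega)
  have har : (addr r).toNat = r := toNat_addr r (by omega)
  have hbits : Bits g.Blk g.len v.mem g.f := (show Real.VorbisOK g.len g.Blk v.mem g.f from hc.point.vorbis).bits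
  have w_rip := hrip
  have hv_rsp := hc.rsp
  have hv_rbp := hc.rbp
  have hv_r12 : v.reg .r12 = addr r := by rw [hr12, hr]; rfl
  have hv_r15 := hloop.r15
  clear hr12
  have w_eq : Mem.EqOn Vorbis.L.textLo Vorbis.L.textHi u₀.mem v.mem := hc.code
  have hdf : v.flags .df = false := (show abiInv _ from hc.inv).1
  have hmx : v.mxcsr &&& 0x1F80 = 0x1F80 := (show abiInv _ from hc.inv).2
  have hsse := Vorbis.sseOK_of_abiInv hc.inv
  have fr_f : UInt64.ofNat (v.mem.readLE (g.e.reg .rsp - 184) 8) = addr f := by rw [hc.fr_f, hrdi]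
  have fr_pcd : v.mem.readLE (g.e.reg .rsp - 176) 8 = tb := by rw [hc.fr_pcd, htb]
  have sl_cs := hloop.sl_cs
  obtain ⟨qn, hqn⟩ : ∃ qn : Nat, (q % 2 ^ 32).toNat = qn := ⟨_, rfl⟩
  have sl_q : v.mem.readLE (g.e.reg .rsp - 192) 4 = qn := by rw [hslot, hqn]
  clear hslot
  obtain ⟨cd, ld_cd⟩ : ∃ cd : Nat, v.mem.readLE (addr r + 16) 8 = cd := ⟨_, rfl⟩
  have hq_lt : q < 2 ^ 31 := by
    obtain ⟨_, hcb, _, _, _⟩ := book_facts7c hent hc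
    have h2 := hcb.K1.ent_lt
    cases hq with
    | inl h => omega
    | inr h => omega
  have hTB : g.TB.live g.Live' := by
    have hbusy : ADOBusy g.A' g.others' v.mem g.f g.sz := hc.point.busy
    exact hbusy.ok.tblock_live_inv hc.shadow hc.tblock
  have hC : 0 < g.C := by
    have := hent.args.ch_le
    have e : g.C = nchan g.e.mem g.f := rfl
    omega
  have hcs : cs < g.PRD := hloop.wa.slot_lt (hc.w_pos hent) hloop.lt
  have hsin := slot_inside g.TB hC hcs hc.tb.size
  obtain ⟨row0, ld_row0⟩ : ∃ row0 : Nat, v.mem.readLE (UInt64.ofNat tb) 8 = row0 := ⟨_, rfl⟩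
  have erow0 : v.mem.ptr (g.TB.base + 8 * 0) = row0 := by
    rw [← ld_row0, htb, Nat.mul_zero, Nat.add_zero]
    rfl
  have eslot : row0 + 8 * cs = slot g.TB g.C g.PRD 0 cs := by
    rw [← erow0]
    exact hc.tb.slot_eq hC cs
  obtain ⟨sl, hsl⟩ : ∃ sl : Nat, slot g.TB g.C g.PRD 0 cs = sl := ⟨_, rfl⟩
  rw [hsl] at eslot hsin
  obtain ⟨hwt1, hwt2, hwt3, hwt4, hwt5, hwt6⟩ := hwt
  have hsla := slot_addr7c row0 cs (by omega)
  rw [eslot] at hsla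
  have hasl : (addr sl).toNat = sl := toNat_addr sl (by omega)
  have hslw : 0x119d40 ≤ sl := by
    have := hent.pre.arenaText
    have e : L.textHi = 0x119d40 := rfl
    omega
  u_walk hcode [hμ.vendor] until [cutE7c, Vorbis.L.decode_residue.cut38] span [Vorbis.L.textLo, Vorbis.L.textHi] side (v_side)
  case check_10f45b =>
    -- 0x10f45b, load8 [r + 16] (`r->classdata`)
    have hun : ShadowUntouched v.mem s_10f45b.mem := by v_untouched
    exact Vorbis.Spec.check_site hc.shadow hun (site_r7c hent hc 16 8 (by omega) (by omega))
      (by rw [hr]; simp only [vfield]; exact toNat_addr _ (by omega))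
  case check_10f476 =>
    -- 0x10f476, load8 [part_classdata] (the row pointer of row 0)
    have hun : ShadowUntouched v.mem s_10f476.mem := by v_untouched
    have hsite := hc.tb.site_rowptr hTB hC (a := tb) (by rw [htb]; omega)
    exact Vorbis.Spec.check_site hc.shadow hun hsite (toNat_addr tb (by omega))
  case check_10f48f =>
    -- 0x10f48f, load8 `r->classdata[q]`, `0 ≤ q < entries` (the `q == EOP` test came first)
    have hun : ShadowUntouched v.mem s_10f48f.mem := by v_untouched
    have hq1 : q ≠ -1 := by
      intro h
      apply hbr_10f450
      omega
    obtain ⟨h0, h2, hsite, -, -, -, -⟩ := cd_site7c hent hc hq hq1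
    have ecd : Residue.classdata v.mem g.r = cd := by
      rw [← ld_cd, hr]
      simp only [vfield, vacc, voff]
    rw [ecd] at hsite
    have hin := hsite.inside hc.point.env.covers
    exact Vorbis.Spec.check_site hc.shadow hun hsite
      (by rw [cd_addr7c cd qn q hqn h0 h2]; exact toNat_addr _ (by omega))
  case check_10f49a =>
    -- 0x10f49a, store8 `part_classdata[0][class_set]`, `class_set < part_read` (WA)
    have hun : ShadowUntouched v.mem s_10f49a.mem := by v_untouched
    have hsite := hc.tb.site_slot hTB hC hcs (a := sl) (by rw [erow0]; exact eslot.symm)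
    exact Vorbis.Spec.check_site hc.shadow hun hsite (by rw [hsla]; exact hasl)
  case cont =>
    -- `q == EOP`: the trampoline
    refine ReachVia.done (Or.inr ?_)
    have hs : Mem.SameExcept (wins7c g) v.mem s_10f450.mem := by
      rw [w_mem]
      exact Mem.SameExcept.refl _ _
    have hun : ShadowUntouched v.mem s_10f450.mem := by v_untouched
    have hcs' : Common u₀ g s_10f450 := by
      apply carry_common7c hent hc (by rw [w_kept .rbp rfl]; exact hv_rbp) (by rw [w_kept .rsp rfl]; exact hv_rsp) w_eq
        (by v_inv) ?_ hs hun
      · rw [w_mem]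
        exact hbits
      · rw [w_mem]
        exact Nat.le_refl _
      · rw [w_mem]
        exact hc.fr_f
    refine ⟨w_rip, hcs', ?_⟩
    rw [w_mem]
    exact hloop.path.sl_tap
  case cont =>
    -- 0x10f49f: the store `part_classdata[0][class_set] = r->classdata[q]`
    have hq1 : q ≠ -1 := by
      intro h
      apply hbr_10f450
      omega
    obtain ⟨h0, h2, hsite, hw1, hw2, hw3, hrowptr⟩ := cd_site7c hent hc hq hq1
    have ecd : Residue.classdata v.mem g.r = cd := by
      rw [← ld_cd, hr]
      simp only [vfield, vacc, voff]
    rw [ecd] at hsite hw1 hw2 hw3 hrowptr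
    have hea := cd_addr7c cd qn q hqn h0 h2
    obtain ⟨a, ha⟩ : ∃ a : Nat, cd + 8 * q.toNat = a := ⟨_, rfl⟩
    rw [ha] at hea hw1 hw2 hw3 hrowptr
    have haa : (addr a).toNat = a := toNat_addr a (by omega)
    have erow : (v.mem.writeLE (g.e.reg .rsp - 256) 8 1111188).readLE
        (Word.ofBV (BitVec.signExtend 64 (BitVec.ofNat 32 qn)) <<< 3 + UInt64.ofNat cd) 8 = v.mem.ptr a := by
      rw [hea]
      have n1 : Mem.NoWrap (g.e.reg .rsp - 256) 8 := by u_omega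
      have n2 : Mem.NoWrap (addr a) 8 := by u_omega
      have n3 : (addr a).toNat + 8 ≤ (g.e.reg .rsp - 256).toNat ∨ (g.e.reg .rsp - 256).toNat + 8 ≤ (addr a).toNat := by
        u_omega
      exact Mem.readLE_writeLE_disjoint_noWrap v.mem (g.e.reg .rsp - 256) 8 1111188 (addr a) 8 n1 n2 n3
    rw [erow] at w_rbx
    obtain ⟨row, hrow⟩ : ∃ row : Nat, v.mem.ptr a = row := ⟨_, rfl⟩
    have hrow_lt : row < 2 ^ 64 := by
      rw [← hrow]
      exact Mem.ptr_lt _ _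
    rw [hrow] at w_rbx hrowptr
    rw [hsla] at w_r13
    have hs : Mem.SameExcept (wins7c g) v.mem s_10f49ar.mem := by
      unfold wins7c
      rw [hf]
      u_same
    have hs1 : Mem.SameExcept [⟨(g.e.reg .rsp).toNat - 256, (g.e.reg .rsp).toNat - 248⟩] v.mem s_10f49ar.mem := by
      u_same
    obtain ⟨hb1, hmu1⟩ := Vorbis.Spec.Reader.reader_of_window hbits hs1 (by omega)
    have hun : ShadowUntouched v.mem s_10f49ar.mem := by v_untouched
    have hc1 : Common u₀ g s_10f49ar := by
      have hinv1 : abiInv s_10f49ar := Vorbis.abiInv_of w_df_10f49a (by rw [w_mxcsr]; exact hmx)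
      apply carry_common7c hent hc (by rw [w_kept .rbp rfl]; exact hv_rbp) w_rsp w_eq hinv1 ?_ hs hun hb1 (by omega)
      rw [hrdi]
      u_resolve
    have hl1 : DecodeA g cs pcount s_10f49ar :=
      carry_decodeA7c hent hc hc1 hch3 hs hloop (by rw [w_kept .r15 rfl]; exact hv_r15)
    have hrow1 : RowPtr s_10f49ar.mem g.f g.r row := hrowptr.frame (reads_between7c hc hc1) (classdata_kept7c hent hc hs)
    have hr12' : s_10f49ar.reg .r12 = UInt64.ofNat g.r := by
      rw [w_kept .r12 rfl, hv_r12, hr]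
      rfl
    refine phaseE7c Lay hLay μ hμ u₀ hcode g hent cs pcount s_10f49ar w_rip hc1 hch3 hr12' hl1 row hrow1 hrow_lt ?_ w_rbx ?_
    · rw [w_r13, hsl]
    · rw [hsl, ← hsla]
      exact w_acc_10f49a

end Vorbis.Spec.decode_residue_7c

/-- Unit `decode_residue.7c` (0x10f40d … 0x10f4a3 of `decode_residue`) takes its entry assertion `At17Mid2` to one of its exit
assertions `At23` (with FILL(0, class_set + 1)) or `At38` (`q == EOP`): the rebasing `start7c`, then the phases C and D (+ E)
composed with `ReachVia.trans`. -/
theorem Vorbis.Spec.Worked.decode_residue_7c_ok : Vorbis.Spec.decode_residue_7c.Statement := by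
  intro Lay hLay μ hμ u₀ hcode hld8 hld1 hld4 hst8 g hent cs pcount v hat s hm
  have h0 := Vorbis.Spec.decode_residue_7c.start7c hent hat hm
  refine (Vorbis.Spec.decode_residue_7c.phaseC7c Lay hLay μ hμ u₀ hcode hld8 hld1 hld4 g hent cs pcount s h0).trans ?_
  intro s3 h3
  exact Vorbis.Spec.decode_residue_7c.phaseD7c Lay hLay μ hμ u₀ hcode hld8 hst8 g hent cs pcount s3 h3
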